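-- pv_equiv track=rewrite | github.com/strands-project/strands_qsr_lib | qsr_lib/src/qsrlib_qsrs/qsr_arg_relations_distance.py | qsrs_for_default
-- ===== SOURCE A (Python) =====
-- def qsrs_for_default(objects_names):
--     if len(objects_names) < 2:
--         return []
--     ret = []
--     for i in sorted(objects_names):
--         for j in objects_names:
--             if i != j and (j, i) not in ret:
--                 ret.append((i, j))
--     return ret
-- ===== SOURCE B (Python) =====
-- def qsrs_for_default(objects_names):
--     return [(i, j) for i in sorted(objects_names) for j in objects_names if j > i]
-- ===== Notes on version B (the rewrite author's own statement) =====
-- stated objective: simpler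
-- what changed: The accumulator-membership test '(j, i) not in ret' (a scan of all previously emitted pairs) is replaced by the direct order comparison 'j > i', so the result is one flat comprehension with no lookup structure; the redundant len<2 guard is dropped.
import Mathlib
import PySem

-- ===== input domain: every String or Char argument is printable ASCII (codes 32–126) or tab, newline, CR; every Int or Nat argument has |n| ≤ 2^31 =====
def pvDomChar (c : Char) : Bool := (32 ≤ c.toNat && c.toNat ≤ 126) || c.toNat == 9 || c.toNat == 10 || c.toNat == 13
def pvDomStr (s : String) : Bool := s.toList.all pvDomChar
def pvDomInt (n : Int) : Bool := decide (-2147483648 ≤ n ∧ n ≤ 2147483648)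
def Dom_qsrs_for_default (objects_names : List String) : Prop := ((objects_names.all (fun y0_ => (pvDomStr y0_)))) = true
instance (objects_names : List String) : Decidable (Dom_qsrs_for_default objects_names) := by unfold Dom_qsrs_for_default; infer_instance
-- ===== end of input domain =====

-- B replaces A's scan of the accumulator ('(j, i) not in ret') with a direct order
-- comparison 'j > i', removing the lookup structure entirely (objective: simpler).

-- ===== PORT A =====
def qsrs_for_default (objects_names : List String) : List (List String) :=
  if objects_names.length < 2 then []
  else
    (PySem.List.sorted objects_names (fun x => x) false).foldl
      (fun ret i =>
        objects_names.foldl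
          (fun ret j => if i ≠ j ∧ [j, i] ∉ ret then ret ++ [[i, j]] else ret) ret) []

-- ===== PORT B =====
def qsrs_for_default_alt (objects_names : List String) : List (List String) :=
  (PySem.List.sorted objects_names (fun x => x) false).flatMap
    (fun i => (objects_names.filter (fun j => i < j)).map (fun j => [i, j]))

-- ===== PRECONDITION & SPEC =====
def Spec_qsrs_for_default (objects_names : List String) (out : List (List String)) : Prop := out = qsrs_for_default_alt objects_names
instance (objects_names : List String) (out : List (List String)) : Decidable (Spec_qsrs_for_default objects_names out) := by unfold Spec_qsrs_for_default; infer_instance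

-- ===== CLAIM (what is proved, stated in full; the proofs are below) =====
def Claim_equal_qsrs_for_default : Prop := ∀ (objects_names : List String), Dom_qsrs_for_default objects_names → Spec_qsrs_for_default objects_names (qsrs_for_default objects_names)

-- ===== LEMMAS AND PROOFS =====

-- pairs emitted by B for a single outer element i
def pvF (L : List String) (i : String) : List (List String) :=
  (L.filter (fun j => i < j)).map (fun j => [i, j])

lemma pvMem_flatMap_pvF (L p : List String) (j i : String) :
    [j, i] ∈ p.flatMap (pvF L) ↔ j ∈ p ∧ i ∈ L ∧ j < i := by
  simp only [pvF, List.mem_flatMap, List.mem_map, List.mem_filter]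
  constructor
  · rintro ⟨a, ha, b, ⟨hb, hab⟩, heq⟩
    simp only [List.cons.injEq, and_true] at heq
    obtain ⟨rfl, rfl⟩ := heq
    exact ⟨ha, hb, by simpa using hab⟩
  · rintro ⟨hj, hi, hlt⟩
    exact ⟨j, hj, i, ⟨hi, by simpa using hlt⟩, rfl⟩

-- A's inner loop over js, given that the accumulator answers '[j,i] ∈ ret ↔ j < i'
lemma pvInner_eq (i : String) (js : List String) (ret : List (List String))
    (h : ∀ j ∈ js, j ≠ i → ([j, i] ∈ ret ↔ j < i)) :
    js.foldl (fun ret j => if i ≠ j ∧ [j, i] ∉ ret then ret ++ [[i, j]] else ret) ret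
      = ret ++ (js.filter (fun j => i < j)).map (fun j => [i, j]) := by
  induction js generalizing ret with
  | nil => simp
  | cons j js ih =>
    by_cases hji : j = i
    · subst hji
      simp only [List.foldl_cons, List.filter_cons]
      rw [if_neg (by simp)]
      have : (decide (j < j)) = false := by simp
      rw [this]
      exact ih ret (fun j' hj' hne => h j' (List.mem_cons_of_mem _ hj') hne)
    · have hmem := h j (List.mem_cons_self) hji
      rcases lt_trichotomy j i with hlt | heq | hgt
      · -- j < i : already in ret, skipped; filter drops it
        simp only [List.foldl_cons, List.filter_cons]
        rw [if_neg (by simp [hmem.mpr hlt])]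
        have : (decide (i < j)) = false := by simp [not_lt_of_gt hlt]
        rw [this]
        exact ih ret (fun j' hj' hne => h j' (List.mem_cons_of_mem _ hj') hne)
      · exact absurd heq hji
      · -- i < j : appended; filter keeps it
        have hnotin : [j, i] ∉ ret := fun hin => absurd (hmem.mp hin) (not_lt_of_gt hgt)
        simp only [List.foldl_cons, List.filter_cons]
        rw [if_pos ⟨Ne.symm hji, hnotin⟩]
        have : (decide (i < j)) = true := by simp [hgt]
        rw [this]
        rw [ih (ret ++ [[i, j]]) ?_]
        · simp
        · intro j' hj' hne
          rw [List.mem_append]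
          constructor
          · rintro (hin | hin)
            · exact (h j' (List.mem_cons_of_mem _ hj') hne).mp hin
            · exfalso; apply hne
              simp only [List.mem_singleton, List.cons.injEq] at hin
              exact hin.1
          · intro hlt'
            exact Or.inl ((h j' (List.mem_cons_of_mem _ hj') hne).mpr hlt')

-- A's outer loop over a suffix 'is' of the sorted list p ++ is
lemma pvOuter_eq (L : List String) (is : List String) :
    ∀ p : List String, (p ++ is).Perm L → (p ++ is).Pairwise (· ≤ ·) →
    is.foldl (fun ret i =>
        L.foldl (fun ret j => if i ≠ j ∧ [j, i] ∉ ret then ret ++ [[i, j]] else ret) ret)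
      (p.flatMap (pvF L))
      = (p ++ is).flatMap (pvF L) := by
  induction is with
  | nil => intro p _ _; simp
  | cons i is ih =>
    intro p hperm hpw
    have hiL : i ∈ L := hperm.mem_iff.mp (by simp)
    have hkey : ∀ j ∈ L, j ≠ i → ([j, i] ∈ p.flatMap (pvF L) ↔ j < i) := by
      intro j hjL _
      rw [pvMem_flatMap_pvF]
      constructor
      · rintro ⟨_, _, hlt⟩; exact hlt
      · intro hlt
        refine ⟨?_, hiL, hlt⟩
        -- j < i and j ∈ L = perm(p ++ i :: is); everything in i :: is is ≥ i
        have hj' : j ∈ p ++ i :: is := hperm.mem_iff.mpr hjL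
        rcases List.mem_append.mp hj' with hp | hs
        · exact hp
        · exfalso
          have hle : i ≤ j := by
            rcases List.mem_cons.mp hs with rfl | hs'
            · exact le_refl _
            · exact List.rel_of_pairwise_cons (List.pairwise_append.mp hpw).2.1 hs'
          exact absurd hlt (not_lt_of_ge hle)
    rw [List.foldl_cons, pvInner_eq i L _ hkey]
    have hstep : p.flatMap (pvF L) ++ (L.filter (fun j => i < j)).map (fun j => [i, j])
        = (p ++ [i]).flatMap (pvF L) := by simp [pvF]
    rw [hstep]
    have := ih (p ++ [i]) (by simpa using hperm) (by simpa using hpw)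
    simpa using this

lemma pv_alt_eq_flatMap (L : List String) :
    qsrs_for_default_alt L
      = (PySem.List.sorted L (fun x => x) false).flatMap (pvF L) := rfl

-- ===== VERDICT (by name: the statement is the Claim_ definition above) =====
theorem qsrs_for_default_spec : Claim_equal_qsrs_for_default := by
  intro L _
  unfold Spec_qsrs_for_default qsrs_for_default
  rw [pv_alt_eq_flatMap]
  set S := PySem.List.sorted L (fun x => x) false with hS
  have hperm : S.Perm L := PySem.List.sorted_perm L (fun x => x) false
  have hpw : S.Pairwise (· ≤ ·) := by
    have := PySem.List.sorted_pairwise L (fun x => x)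
    simpa using this
  have hmain :
      S.foldl (fun ret i =>
        L.foldl (fun ret j => if i ≠ j ∧ [j, i] ∉ ret then ret ++ [[i, j]] else ret) ret) []
        = S.flatMap (pvF L) := by
    have := pvOuter_eq L S [] (by simpa using hperm) (by simpa using hpw)
    simpa using this
  by_cases hlen : L.length < 2
  · rw [if_pos hlen]
    -- for length 0 or 1 the flatMap is empty too
    match L, hlen with
    | [], _ => simp [pvF]
    | [a], _ =>
      have hs : PySem.List.sorted [a] (fun x => x) false = [a] :=
        PySem.List.sorted_eq_self_of_pairwise _ _ (by simp)
      simp [hS, hs, pvF]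
  · rw [if_neg hlen]
    exact hmain
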